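-- pv_equiv track=rewrite | github.com/Zagrebelin/advent_of_code_2015 | 20.py | process_b
-- ===== SOURCE A (Python) =====
-- def process_b(count):
--     houses = [0 for _ in range(count)]
--     for elf in range(1, count):
--         house_count = 0
--         for house in range(elf, count, elf):
--             houses[house] += elf * 11
--             house_count += 1
--             if house_count == 50:
--                 break
--     return houses[1:]
-- ===== SOURCE B (Python) =====
-- def process_b(count):
--     result = []
--     for house in range(1, count):
--         total = 0
--         for q in range(1, 51):
--             if house % q == 0:
--                 total += 11 * (house // q)
--         result.append(total)
--     return result
-- ===== Notes on version B (the rewrite author's own statement) =====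
-- stated objective: alternative
-- what changed: Replaces the mutable sieve (each elf stamping its first 50 multiples into a shared houses array, then slicing off house 0) with a direct per-house computation: for each house, sum 11*(house//q) over the quotients q in 1..50 that divide the house, appending to the result in one pass with no array mutation and no slicing.
import Mathlib
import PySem

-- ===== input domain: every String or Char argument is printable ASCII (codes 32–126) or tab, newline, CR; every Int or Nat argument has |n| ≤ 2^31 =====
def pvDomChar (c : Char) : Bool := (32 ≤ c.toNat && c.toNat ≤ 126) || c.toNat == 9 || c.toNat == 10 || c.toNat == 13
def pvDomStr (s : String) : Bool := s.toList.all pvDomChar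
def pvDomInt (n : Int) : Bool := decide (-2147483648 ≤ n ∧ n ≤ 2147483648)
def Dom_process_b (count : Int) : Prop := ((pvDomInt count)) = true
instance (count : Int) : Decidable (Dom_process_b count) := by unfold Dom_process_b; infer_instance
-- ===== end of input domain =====

-- B replaces A's mutable 50-capped elf sieve with a per-house sum of 11*d over divisors d having house//d <= 50 (alternative decomposition; not faster).


-- ===== PORT A =====
-- inner loop: 'for house in range(elf, count, elf): houses[house] += elf*11; house_count += 1; if house_count == 50: break'
def pvInnerA (elf : Int) : List Int → Int → List Int → List Int
  | hs, _, [] => hs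
  | hs, hc, house :: rest =>
    let hs' := PySem.List.pySetD hs house (PySem.List.pyGetD hs house 0 + elf * 11)
    if hc + 1 = 50 then hs' else pvInnerA elf hs' (hc + 1) rest

def process_b (count : Int) : List Int :=
  let houses := (PySem.List.pyRange 0 count 1).map (fun _ => (0 : Int))
  let final := (PySem.List.pyRange 1 count 1).foldl
      (fun hs elf => pvInnerA elf hs 0 (PySem.List.pyRange elf count elf)) houses
  PySem.List.slice final (some 1) none

-- ===== PORT B =====
def process_b_alt (count : Int) : List Int :=
  (PySem.List.pyRange 1 count 1).foldl
    (fun res house =>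
      res ++ [(PySem.List.pyRange 1 51 1).foldl
        (fun total q =>
          if PySem.Int.mod house q = 0 then total + 11 * PySem.Int.floordiv house q
          else total) 0]) []

-- ===== PRECONDITION & SPEC =====
def Spec_process_b (count : Int) (out : List Int) : Prop := out = process_b_alt count
instance (count : Int) (out : List Int) : Decidable (Spec_process_b count out) := by unfold Spec_process_b; infer_instance

-- ===== CLAIM (what is proved, stated in full; the proofs are below) =====
def Claim_equal_process_b : Prop := ∀ (count : Int), Dom_process_b count → Spec_process_b count (process_b count)

-- ===== LEMMAS AND PROOFS =====

-- the amount elf e adds to house h in A's sieve (first 50 multiples of e below count)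
def pvContrib (count h e : Int) : Int :=
  if h ∈ (PySem.List.pyRange e count e).take 50 then e * 11 else 0

lemma pvInnerA_spec (elf : Int) (ps : List Int) : ∀ (hs : List Int) (hc : Int),
    ps.Nodup → (∀ p ∈ ps, 0 ≤ p ∧ p < (hs.length : Int)) → 0 ≤ hc → hc < 50 →
    (pvInnerA elf hs hc ps).length = hs.length ∧
    ∀ j : Nat, j < hs.length →
      PySem.List.pyGetD (pvInnerA elf hs hc ps) (j : Int) 0 =
        PySem.List.pyGetD hs (j : Int) 0 +
          (if (j : Int) ∈ ps.take (50 - hc).toNat then elf * 11 else 0) := by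
  induction ps with
  | nil =>
    intro hs hc _ _ _ _
    refine ⟨rfl, ?_⟩
    intro j hj
    simp [pvInnerA]
  | cons p rest ih =>
    intro hs hc hnd hrange h0 h50
    have hp0 : 0 ≤ p := (hrange p (by simp)).1
    have hplen : p < (hs.length : Int) := (hrange p (by simp)).2
    have hpnat : p.toNat < hs.length := by omega
    have hpcast : p = ((p.toNat : Nat) : Int) := by omega
    have hset : PySem.List.pySetD hs p (PySem.List.pyGetD hs p 0 + elf * 11)
        = hs.set p.toNat (PySem.List.pyGetD hs p 0 + elf * 11) :=
      PySem.List.pySetD_of_nonneg hs _ hp0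
    have hlen' : (PySem.List.pySetD hs p (PySem.List.pyGetD hs p 0 + elf * 11)).length = hs.length :=
      PySem.List.length_pySetD hs p _
    have hget' : ∀ j : Nat, PySem.List.pyGetD (PySem.List.pySetD hs p (PySem.List.pyGetD hs p 0 + elf * 11)) (j : Int) 0
        = if j = p.toNat then PySem.List.pyGetD hs p 0 + elf * 11 else PySem.List.pyGetD hs (j : Int) 0 := by
      intro j
      rw [hpcast]
      rw [PySem.List.pyGetD_pySetD_natCast hs p.toNat j _ 0 hpnat]
      rw [← hpcast]
    have htake : (50 - hc).toNat = (50 - (hc + 1)).toNat + 1 := by omega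
    by_cases hcase : hc + 1 = 50
    · -- last iteration: result is the updated list
      have hres : pvInnerA elf hs hc (p :: rest) = PySem.List.pySetD hs p (PySem.List.pyGetD hs p 0 + elf * 11) := by
        simp [pvInnerA, hcase]
      have htake1 : (50 - hc).toNat = 1 := by omega
      refine ⟨by rw [hres]; exact hlen', ?_⟩
      intro j hj
      rw [hres, hget', htake1]
      by_cases hj' : j = p.toNat
      · subst hj'
        simp [← hpcast]
      · have : ((j : Int) = p) = False := by simp; omega
        simp [hj', List.take, this]
    · have hres : pvInnerA elf hs hc (p :: rest)
          = pvInnerA elf (PySem.List.pySetD hs p (PySem.List.pyGetD hs p 0 + elf * 11)) (hc + 1) rest := by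
        simp [pvInnerA, hcase]
      have hrange' : ∀ q ∈ rest, 0 ≤ q ∧ q < ((PySem.List.pySetD hs p (PySem.List.pyGetD hs p 0 + elf * 11)).length : Int) := by
        intro q hq; rw [hlen']; exact hrange q (by simp [hq])
      obtain ⟨ihlen, ihget⟩ := ih (PySem.List.pySetD hs p (PySem.List.pyGetD hs p 0 + elf * 11)) (hc + 1)
        hnd.of_cons hrange' (by omega) (by omega)
      refine ⟨by rw [hres, ihlen, hlen'], ?_⟩
      intro j hj
      rw [hres, ihget j (by rw [hlen']; exact hj), hget', htake, List.take_succ_cons]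
      by_cases hj' : j = p.toNat
      · subst hj'
        have hjp : ((p.toNat : Nat) : Int) = p := by omega
        have hnotin : ¬ ((p.toNat : Nat) : Int) ∈ rest.take (50 - (hc + 1)).toNat := by
          intro hmem
          exact (List.nodup_cons.mp hnd).1 (hjp ▸ List.mem_of_mem_take hmem)
        have hmemc : ((p.toNat : Nat) : Int) ∈ p :: rest.take (50 - (hc + 1)).toNat := by
          rw [hjp]; exact List.mem_cons_self
        rw [if_pos rfl, if_neg hnotin, add_zero, if_pos hmemc, hjp]
      · have hjp : ¬ (j : Int) = p := by omega
        simp [hj', hjp, List.mem_cons]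

lemma pv_mem_take50 (count e h : Int) (he : 1 ≤ e) (hh : 1 ≤ h) (hcnt : h < count) :
    (h ∈ (PySem.List.pyRange e count e).take 50) ↔ (e ∣ h ∧ h ≤ 50 * e) := by
  have hpos : (0 : Int) < e := he
  have hform := PySem.List.pyRange_of_pos e count hpos
  have hmemfull : ∀ x : Int, x ∈ PySem.List.pyRange e count e ↔ (e ≤ x ∧ x < count ∧ e ∣ x - e) :=
    fun x => PySem.List.mem_pyRange_iff_of_pos hpos x
  rw [hform, ← List.map_take, List.take_range]
  constructor
  · intro hmem
    simp only [List.mem_map, List.mem_range, Nat.lt_min] at hmem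
    obtain ⟨k, ⟨hk50, hkm⟩, hkx⟩ := hmem
    refine ⟨⟨(k : Int) + 1, by linarith [hkx.symm]⟩, ?_⟩
    · have : (k : Int) ≤ 49 := by exact_mod_cast Nat.lt_succ_iff.mp (by omega)
      nlinarith [hkx]
  · rintro ⟨⟨c, hc⟩, hle⟩
    have hc1 : 1 ≤ c := by nlinarith
    have hc50 : c ≤ 50 := by nlinarith
    have hcast : ((c - 1).toNat : Int) = c - 1 := by omega
    have hval : e + e * ((c - 1).toNat : Int) = h := by rw [hcast]; rw [hc]; ring
    have hmem : h ∈ PySem.List.pyRange e count e := by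
      rw [hmemfull]
      refine ⟨by nlinarith, hcnt, ⟨c - 1, by rw [hc]; ring⟩⟩
    rw [hform] at hmem
    simp only [List.mem_map, List.mem_range] at hmem
    obtain ⟨k', hk'm, hk'x⟩ := hmem
    have hkeq : (k' : Int) = c - 1 := by
      have : e * (k' : Int) = e * (c - 1) := by nlinarith [hk'x]
      have := mul_left_cancel₀ (by omega : e ≠ 0) this
      omega
    have hm : (c - 1).toNat < (if e < count then ((count - e + e - 1) / e).toNat else 0) := by
      omega
    refine List.mem_map.mpr ⟨(c - 1).toNat, List.mem_range.mpr (Nat.lt_min.mpr ⟨by omega, hm⟩), hval⟩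

lemma pv_nodup_pyRange (e count : Int) (he : 1 ≤ e) : (PySem.List.pyRange e count e).Nodup := by
  rw [PySem.List.pyRange_of_pos e count (by omega)]
  refine List.Nodup.map ?_ List.nodup_range
  intro a b hab
  simp only at hab
  have h1 : e * (a : Int) = e * (b : Int) := by linarith
  have := mul_left_cancel₀ (by omega : e ≠ 0) h1
  omega

lemma pvOuter_spec (count : Int) : ∀ (es : List Int) (hs : List Int),
    (∀ e ∈ es, 1 ≤ e) → hs.length = count.toNat →
    (es.foldl (fun hs elf => pvInnerA elf hs 0 (PySem.List.pyRange elf count elf)) hs).length = hs.length ∧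
    ∀ j : Nat, j < hs.length →
      PySem.List.pyGetD (es.foldl (fun hs elf => pvInnerA elf hs 0 (PySem.List.pyRange elf count elf)) hs) (j : Int) 0 =
        PySem.List.pyGetD hs (j : Int) 0 + (es.map (fun e => pvContrib count (j : Int) e)).sum := by
  intro es
  induction es with
  | nil => intro hs _ _; exact ⟨rfl, by simp⟩
  | cons e rest ih =>
    intro hs hes hlen
    have he : 1 ≤ e := hes e (by simp)
    have hrange : ∀ p ∈ PySem.List.pyRange e count e, 0 ≤ p ∧ p < (hs.length : Int) := by
      intro p hp
      have := (PySem.List.mem_pyRange_iff_of_pos (by omega : (0:Int) < e) p).mp hp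
      rw [hlen]
      omega
    obtain ⟨hlen1, hget1⟩ := pvInnerA_spec e (PySem.List.pyRange e count e) hs 0
      (pv_nodup_pyRange e count he) hrange (by omega) (by omega)
    obtain ⟨hlen2, hget2⟩ := ih (pvInnerA e hs 0 (PySem.List.pyRange e count e))
      (fun x hx => hes x (by simp [hx])) (by rw [hlen1, hlen])
    refine ⟨by simpa [hlen1] using hlen2, ?_⟩
    intro j hj
    have hj1 : j < (pvInnerA e hs 0 (PySem.List.pyRange e count e)).length := by rw [hlen1]; exact hj
    simp only [List.foldl_cons]
    have h50 : ((50 : Int) - 0).toNat = 50 := rfl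
    rw [hget2 j hj1, hget1 j hj, h50]
    simp only [List.map_cons, List.sum_cons, pvContrib]
    ring

lemma pv_toFinset_pyRange (a b : Int) :
    (PySem.List.pyRange a b 1).toFinset = Finset.Icc a (b - 1) := by
  ext x
  simp only [List.mem_toFinset, PySem.List.mem_pyRange_one, Finset.mem_Icc]
  omega

lemma pv_sum_eq (count h : Int) (hh : 1 ≤ h) (hcnt : h < count) :
    ((PySem.List.pyRange 1 count 1).map (fun e => pvContrib count h e)).sum =
      (PySem.List.pyRange 1 51 1).foldl
        (fun total q =>
          if PySem.Int.mod h q = 0 then total + 11 * PySem.Int.floordiv h q else total) 0 := by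
  have hbody : (fun total q =>
      if PySem.Int.mod h q = 0 then total + 11 * PySem.Int.floordiv h q else total)
      = (fun total q => total + (if PySem.Int.mod h q = 0 then 11 * PySem.Int.floordiv h q else 0)) := by
    funext total q
    split_ifs <;> simp
  rw [hbody, PySem.List.foldl_add, zero_add]
  -- termwise clean-up of B's summand on its range
  have hR : (PySem.List.pyRange 1 51 1).map
        (fun q => if PySem.Int.mod h q = 0 then 11 * PySem.Int.floordiv h q else 0)
      = (PySem.List.pyRange 1 51 1).map (fun q => if q ∣ h then 11 * (h / q) else 0) := by
    apply List.map_congr_left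
    intro q hq
    have hb := PySem.List.mem_pyRange_one.mp hq
    rw [PySem.Int.floordiv_eq_ediv_of_pos (by omega : (0:Int) < q)]
    simp only [PySem.Int.mod_eq_zero_iff_dvd]
  -- termwise clean-up of A's summand on its range
  have hL : (PySem.List.pyRange 1 count 1).map (fun e => pvContrib count h e)
      = (PySem.List.pyRange 1 count 1).map (fun e => if e ∣ h ∧ h ≤ 50 * e then e * 11 else 0) := by
    apply List.map_congr_left
    intro e he
    have hb := PySem.List.mem_pyRange_one.mp he
    unfold pvContrib
    simp only [pv_mem_take50 count e h (by omega) hh hcnt]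
  rw [hR, hL]
  -- move to Finset sums over Icc
  rw [← List.sum_toFinset _ (PySem.List.nodup_pyRange_one 1 count),
      ← List.sum_toFinset _ (PySem.List.nodup_pyRange_one 1 51),
      pv_toFinset_pyRange, pv_toFinset_pyRange,
      ← Finset.sum_filter, ← Finset.sum_filter]
  -- reindex by the divisor-pair bijection e ↦ h / e
  refine Finset.sum_bij' (fun e _ => h / e) (fun q _ => h / q) ?_ ?_ ?_ ?_ ?_
  · intro e he
    simp only [Finset.mem_filter, Finset.mem_Icc] at he ⊢
    obtain ⟨⟨he1, _⟩, ⟨c, hc⟩, hle⟩ := he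
    have hc' : h / e = c := by rw [hc, Int.mul_ediv_cancel_left c (by omega)]
    rw [hc']
    refine ⟨⟨by nlinarith, by nlinarith⟩, ⟨e, by rw [hc]; ring⟩⟩
  · intro q hq
    simp only [Finset.mem_filter, Finset.mem_Icc] at hq ⊢
    obtain ⟨⟨hq1, hq50⟩, ⟨c, hc⟩⟩ := hq
    have hc' : h / q = c := by rw [hc, Int.mul_ediv_cancel_left c (by omega)]
    have hc1 : 1 ≤ c := by nlinarith
    have hcle : c ≤ h := by nlinarith
    rw [hc']
    exact ⟨⟨hc1, by omega⟩, ⟨q, by rw [hc]; ring⟩, by nlinarith⟩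
  · intro e he
    simp only [Finset.mem_filter, Finset.mem_Icc] at he
    obtain ⟨⟨he1, he2⟩, ⟨c, hc⟩, hle⟩ := he
    show h / (h / e) = e
    have hc1 : 1 ≤ c := by nlinarith
    have h1 : h / e = c := by rw [hc, Int.mul_ediv_cancel_left c (by omega)]
    have h2 : h / c = e := by rw [hc, mul_comm, Int.mul_ediv_cancel_left e (by omega)]
    rw [h1, h2]
  · intro q hq
    simp only [Finset.mem_filter, Finset.mem_Icc] at hq
    obtain ⟨⟨hq1, hq2⟩, ⟨c, hc⟩⟩ := hq
    show h / (h / q) = q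
    have hc1 : 1 ≤ c := by nlinarith
    have h1 : h / q = c := by rw [hc, Int.mul_ediv_cancel_left c (by omega)]
    have h2 : h / c = q := by rw [hc, mul_comm, Int.mul_ediv_cancel_left q (by omega)]
    rw [h1, h2]
  · intro e he
    simp only [Finset.mem_filter, Finset.mem_Icc] at he
    obtain ⟨⟨he1, he2⟩, ⟨c, hc⟩, hle⟩ := he
    show e * 11 = 11 * (h / (h / e))
    have hc1 : 1 ≤ c := by nlinarith
    have h1 : h / e = c := by rw [hc, Int.mul_ediv_cancel_left c (by omega)]
    have h2 : h / c = e := by rw [hc, mul_comm, Int.mul_ediv_cancel_left e (by omega)]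
    rw [h1, h2]
    ring

-- ===== VERDICT (by name: the statement is the Claim_ definition above) =====
theorem process_b_spec : Claim_equal_process_b := by
  intro count _dom
  show process_b count = process_b_alt count
  have hB : process_b_alt count = (PySem.List.pyRange 1 count 1).map
      (fun house => (PySem.List.pyRange 1 51 1).foldl
        (fun total q =>
          if PySem.Int.mod house q = 0 then total + 11 * PySem.Int.floordiv house q
          else total) 0) := by
    unfold process_b_alt
    simpa using PySem.List.foldl_append_singleton_eq_map _ (PySem.List.pyRange 1 count 1) []
  set houses0 := (PySem.List.pyRange 0 count 1).map (fun _ => (0 : Int)) with hh0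
  have hlen0 : houses0.length = count.toNat := by
    simp [hh0, PySem.List.length_pyRange_one]
  have hget0 : ∀ j : Nat, j < houses0.length → PySem.List.pyGetD houses0 (j : Int) 0 = 0 := by
    intro j hj
    rw [PySem.List.pyGetD_eq_getElem houses0 0 (by omega) (by exact_mod_cast hj)]
    simp [hh0]
  obtain ⟨hlenF, hgetF⟩ := pvOuter_spec count (PySem.List.pyRange 1 count 1) houses0
    (fun e he => (PySem.List.mem_pyRange_one.mp he).1) hlen0
  set final := (PySem.List.pyRange 1 count 1).foldl
      (fun hs elf => pvInnerA elf hs 0 (PySem.List.pyRange elf count elf)) houses0 with hfin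
  show PySem.List.slice final (some 1) none = _
  rw [PySem.List.slice_from_one, hB]
  apply List.ext_getElem
  · simp [List.length_tail, hlenF, hlen0, PySem.List.length_pyRange_one]
  · intro k h1 h2
    have hklt : k + 1 < houses0.length := by
      simp [List.length_tail, hlenF] at h1
      omega
    have hcountk : ((k : Int) + 1) < count := by
      rw [hlen0] at hklt
      omega
    rw [List.getElem_tail]
    rw [List.getElem_map, PySem.List.getElem_pyRange_one]
    have hidx : final[k + 1] = PySem.List.pyGetD final ((k + 1 : Nat) : Int) 0 := by
      rw [PySem.List.pyGetD_eq_getElem final 0 (by omega) (by rw [hlenF]; exact_mod_cast hklt)]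
      congr 1
    rw [hidx, hgetF (k + 1) hklt, hget0 (k + 1) hklt, zero_add]
    have hcast : ((k + 1 : Nat) : Int) = 1 + (k : Int) := by push_cast; ring
    rw [hcast, pv_sum_eq count (1 + (k : Int)) (by omega) (by omega)]
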